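-- pv_equiv track=rewrite | github.com/MrBrantCode/unitest_baseline | mut_generate/mist_train_cf/cf_93742/solution.py | count_unique_vowels
-- ===== SOURCE A (Python) =====
-- def count_unique_vowels(sentence):
--     vowels = set('aeiou')
--     unique_vowels = set()
--     prev_consonant = False
--
--     for i in range(1, len(sentence)-1):
--         if sentence[i] in vowels:
--             if prev_consonant and (i == len(sentence) - 2 or sentence[i+1] not in vowels):
--                 unique_vowels.add(sentence[i])
--             prev_consonant = False
--         elif sentence[i] not in vowels and (i == 0 or sentence[i-1] not in vowels) and (i < len(sentence) - 1 and sentence[i+1] in vowels):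
--             prev_consonant = True
--
--     return len(unique_vowels)
-- ===== SOURCE B (Python) =====
-- def count_unique_vowels(sentence):
--     n = len(sentence)
--     vowels = set('aeiou')
--     qualified = {sentence[i] for i in range(2, n - 1)
--                  if sentence[i] in vowels
--                  and sentence[i - 1] not in vowels
--                  and sentence[i - 2] not in vowels
--                  and (i == n - 2 or sentence[i + 1] not in vowels)}
--     return len(qualified)
-- ===== Notes on version B (the rewrite author's own statement) =====
-- stated objective: simpler
-- what changed: Replaces the carried prev_consonant flag and branching state machine with a stateless one-pass set comprehension that tests each position independently (vowel at i, non-vowels at i-1 and i-2, and no vowel right after unless at the end); the comprehension avoids per-iteration flag bookkeeping.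
import Mathlib
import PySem

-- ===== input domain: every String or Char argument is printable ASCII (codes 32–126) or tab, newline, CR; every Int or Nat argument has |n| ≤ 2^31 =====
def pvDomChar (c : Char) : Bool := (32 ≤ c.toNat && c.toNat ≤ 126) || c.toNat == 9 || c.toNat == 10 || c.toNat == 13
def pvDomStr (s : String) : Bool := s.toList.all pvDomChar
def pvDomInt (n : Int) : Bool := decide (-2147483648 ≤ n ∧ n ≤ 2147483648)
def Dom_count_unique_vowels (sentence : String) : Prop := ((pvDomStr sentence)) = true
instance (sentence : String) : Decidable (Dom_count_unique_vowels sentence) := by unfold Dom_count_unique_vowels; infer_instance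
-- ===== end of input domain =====

-- B replaces A's carried prev_consonant flag with a stateless per-position predicate (simpler decomposition).

-- ===== PORT A =====
-- 'sentence[i] in vowels'; every index the Python reads is in range, so pyGetD is exact here
def pvVow (s : List Char) (i : Int) : Bool :=
  (['a','e','i','o','u'] : List Char).contains (PySem.List.pyGetD s i ' ')

-- the body of A's for-loop, step for step (state = (unique_vowels, prev_consonant))
def pvStepA (s : List Char) (n : Int) (st : PySem.Set Char × Bool) (i : Int) :
    PySem.Set Char × Bool :=
  if pvVow s i then
    ((if st.2 && (decide (i = n - 2) || !pvVow s (i + 1)) then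
        PySem.Set.add st.1 (PySem.List.pyGetD s i ' ')
      else st.1), false)
  else if !pvVow s i && (decide (i = 0) || !pvVow s (i - 1)) &&
          (decide (i < n - 1) && pvVow s (i + 1)) then
    (st.1, true)
  else st

def count_unique_vowels (sentence : String) : Int :=
  let s := sentence.toList
  let n : Int := (s.length : Int)
  let res := (PySem.List.pyRange 1 (n - 1) 1).foldl (pvStepA s n) (PySem.Set.empty, false)
  ((res.1.length : Nat) : Int)

-- ===== PORT B =====
-- the comprehension's filter condition in Source B
def pvPredB (s : List Char) (n : Int) (i : Int) : Bool :=
  pvVow s i && !pvVow s (i - 1) && !pvVow s (i - 2) &&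
    (decide (i = n - 2) || !pvVow s (i + 1))

def count_unique_vowels_alt (sentence : String) : Int :=
  let s := sentence.toList
  let n : Int := (s.length : Int)
  let qualified : PySem.Set Char :=
    PySem.Set.ofList
      (((PySem.List.pyRange 2 (n - 1) 1).filter (pvPredB s n)).map
        (fun i => PySem.List.pyGetD s i ' '))
  ((qualified.length : Nat) : Int)

-- ===== PRECONDITION & SPEC =====
def Spec_count_unique_vowels (sentence : String) (out : Int) : Prop := out = count_unique_vowels_alt sentence
instance (sentence : String) (out : Int) : Decidable (Spec_count_unique_vowels sentence out) := by unfold Spec_count_unique_vowels; infer_instance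

-- ===== CLAIM (what is proved, stated in full; the proofs are below) =====
def Claim_equal_count_unique_vowels : Prop := ∀ (sentence : String), Dom_count_unique_vowels sentence → Spec_count_unique_vowels sentence (count_unique_vowels sentence)

-- ===== LEMMAS AND PROOFS =====

-- the value of A's prev_consonant flag at the start of the iteration for index a
def pvPrev (s : List Char) (a : Int) : Bool :=
  decide (2 ≤ a) && !pvVow s (a - 1) && !pvVow s (a - 2) && pvVow s a

lemma pvStepA_eq (s : List Char) (n a : Int) (acc : PySem.Set Char)
    (h1 : 1 ≤ a) (h2 : a < n - 1) :
    pvStepA s n (acc, pvPrev s a) a =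
      ((if decide (2 ≤ a) && pvPredB s n a then
          PySem.Set.add acc (PySem.List.pyGetD s a ' ') else acc),
       pvPrev s (a + 1)) := by
  have h0 : decide (a = 0) = false := by simp; omega
  have hlt : decide (a < n - 1) = true := by simp; omega
  simp only [pvStepA, pvPrev, pvPredB, h0, hlt,
    show (a : Int) + 1 - 1 = a from by ring, show (a : Int) + 1 - 2 = a - 1 from by ring]
  by_cases hva : pvVow s a = true <;>
    by_cases hva1 : pvVow s (a - 1) = true <;>
      by_cases hva2 : pvVow s (a - 2) = true <;>
        by_cases hvn : pvVow s (a + 1) = true <;>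
          by_cases h2a : 2 ≤ a <;>
            simp [hva, hva1, hva2, hvn, h2a] <;> omega

lemma pvLoop_eq (s : List Char) (n : Int) :
    ∀ (k : Nat) (a : Int) (acc : PySem.Set Char), 1 ≤ a → (n - 1 - a).toNat ≤ k →
      ((PySem.List.pyRange a (n - 1) 1).foldl (pvStepA s n) (acc, pvPrev s a)).1 =
        ((PySem.List.pyRange (max a 2) (n - 1) 1).filter (pvPredB s n)).foldl
          (fun acc i => PySem.Set.add acc (PySem.List.pyGetD s i ' ')) acc := by
  intro k
  induction k with
  | zero =>
    intro a acc h1 hk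
    have hle : n - 1 ≤ a := by omega
    rw [PySem.List.pyRange_one_eq_nil hle,
        PySem.List.pyRange_one_eq_nil (by omega : n - 1 ≤ max a 2)]
    simp
  | succ k ih =>
    intro a acc h1 hk
    by_cases hlt : a < n - 1
    · rw [PySem.List.pyRange_one_cons hlt]
      simp only [List.foldl_cons]
      rw [pvStepA_eq s n a acc h1 hlt]
      rw [ih (a + 1) _ (by omega) (by omega)]
      by_cases h2a : 2 ≤ a
      · have hmx : max a 2 = a := by omega
        have hmx' : max (a + 1) 2 = a + 1 := by omega
        rw [hmx, hmx', PySem.List.pyRange_one_cons hlt]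
        simp only [List.filter_cons, h2a, decide_true, Bool.true_and]
        by_cases hp : pvPredB s n a = true
        · simp [hp]
        · simp [Bool.eq_false_iff.mpr hp]
      · have ha1 : a = 1 := by omega
        have hmx : max a 2 = 2 := by omega
        have hmx' : max (a + 1) 2 = 2 := by omega
        rw [hmx, hmx']
        simp [h2a]
    · have hle : n - 1 ≤ a := by omega
      rw [PySem.List.pyRange_one_eq_nil hle,
          PySem.List.pyRange_one_eq_nil (by omega : n - 1 ≤ max a 2)]
      simp

-- ===== VERDICT (by name: the statement is the Claim_ definition above) =====
theorem count_unique_vowels_spec : Claim_equal_count_unique_vowels := by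
  intro sentence _
  unfold Spec_count_unique_vowels count_unique_vowels count_unique_vowels_alt
  have h := pvLoop_eq sentence.toList ((sentence.toList.length : Int))
      (((sentence.toList.length : Int) - 1 - 1).toNat) 1 PySem.Set.empty (le_refl 1) (le_refl _)
  rw [show pvPrev sentence.toList 1 = false from by simp [pvPrev]] at h
  rw [show max (1 : Int) 2 = 2 from by norm_num] at h
  simp only [PySem.Set.empty] at h
  simp only [PySem.Set.ofList_eq_foldl, List.foldl_map, PySem.Set.empty, h]
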